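-- pv_equiv track=rewrite | github.com/alejoteran/HashiGame | src/Bridges.py | validar_conexiones_necesarias
-- ===== SOURCE A (Python) =====
-- numeros = ['0', '1', '2', '3', '4', '5', '6', '7', '8', '9', '10', '11']
--
-- def validar_conexiones_necesarias(matriz):
--     filas = len(matriz)
--     columnas = len(matriz[0])
--     solucion = []
--
--     # Recorrer horizontalmente
--     for i in range(filas):
--         for j in range(columnas):
--             if matriz[i][j] in numeros:    #estoy en la isla matriz[i][j]
--                 suma = 0
--
--                 if i > 0 and matriz[i - 1][j] == '|':
--                     suma += 1
--                 if i < filas - 1 and matriz[i + 1][j] == '|':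
--                     suma += 1
--                 if i > 0 and matriz[i - 1][j] == 'H':
--                     suma += 2
--                 if i < filas - 1 and matriz[i + 1][j] == 'H':
--                     suma += 2
--                 if j > 0 and matriz[i][j - 1] == '-':
--                     suma += 1
--                 if j < columnas - 1 and matriz[i][j + 1] == '-':
--                     suma += 1
--                 if j > 0 and matriz[i][j - 1] == '=':
--                     suma += 2
--                 if j < columnas - 1 and matriz[i][j + 1] == '=':
--                     suma += 2
--
--                 #print (f"La isla {matriz[i][j]} tiene {suma} conexiones")
--                 solucion.append((int(matriz[i][j]), int(suma))) #lista de tuplas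
--     return solucion
-- ===== SOURCE B (Python) =====
-- numeros = ['0', '1', '2', '3', '4', '5', '6', '7', '8', '9', '10', '11']
--
-- def validar_conexiones_necesarias(matriz):
--     # Scatter pass: each bridge cell pushes its weight onto the adjacent island
--     # cells; a second pass collects the accumulated load of every island.
--     filas = len(matriz)
--     columnas = len(matriz[0])
--     carga = {}
--     for i in range(filas):
--         for j in range(columnas):
--             c = matriz[i][j]
--             if c == '|' or c == 'H':
--                 w = 1 if c == '|' else 2
--                 for ni in (i - 1, i + 1):
--                     if 0 <= ni < filas and matriz[ni][j] in numeros: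
--                         carga[(ni, j)] = carga.get((ni, j), 0) + w
--             elif c == '-' or c == '=':
--                 w = 1 if c == '-' else 2
--                 for nj in (j - 1, j + 1):
--                     if 0 <= nj < columnas and matriz[i][nj] in numeros:
--                         carga[(i, nj)] = carga.get((i, nj), 0) + w
--     return [(int(matriz[i][j]), carga.get((i, j), 0))
--             for i in range(filas) for j in range(columnas)
--             if matriz[i][j] in numeros]
-- ===== Notes on version B (the rewrite author's own statement) =====
-- stated objective: alternative
-- what changed: A gathers: for each island it inspects its four neighbors with eight if-branches; B scatters: each bridge cell pushes its weight onto the adjacent island cells in a dict of loads, and a second pass collects the load of each island.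
import Mathlib
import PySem

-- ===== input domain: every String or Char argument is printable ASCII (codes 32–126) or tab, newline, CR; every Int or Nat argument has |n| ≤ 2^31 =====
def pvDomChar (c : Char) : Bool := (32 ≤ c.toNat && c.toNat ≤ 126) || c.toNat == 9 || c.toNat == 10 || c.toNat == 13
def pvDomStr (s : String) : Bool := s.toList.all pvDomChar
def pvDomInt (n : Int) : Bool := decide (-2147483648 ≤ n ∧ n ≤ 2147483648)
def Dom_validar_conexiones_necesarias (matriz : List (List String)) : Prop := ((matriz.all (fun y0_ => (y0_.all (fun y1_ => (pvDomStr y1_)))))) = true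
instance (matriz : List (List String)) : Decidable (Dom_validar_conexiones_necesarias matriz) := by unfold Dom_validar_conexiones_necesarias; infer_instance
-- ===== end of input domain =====

-- B replaces A's gather (eight neighbor checks per island) by a scatter: each bridge
-- cell pushes its weight onto the adjacent islands in a dict of loads, collected in a
-- second pass (alternative algorithm; same cost).

-- ===== PORT A =====
def pvNumeros : List String := ["0", "1", "2", "3", "4", "5", "6", "7", "8", "9", "10", "11"]

-- matriz[i][j]; total form, exact under Pre_ (all accesses are in bounds there)
def pvCell (matriz : List (List String)) (i j : Nat) : String :=
  (matriz.getD i []).getD j ""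

def validar_conexiones_necesarias (matriz : List (List String)) : List (Int × Int) :=
  let filas := matriz.length
  let columnas := (matriz.headD []).length
  (List.range filas).foldl (fun solucion i =>
    (List.range columnas).foldl (fun solucion j =>
      if pvCell matriz i j ∈ pvNumeros then
        let suma : Int := 0
        let suma := if 0 < i ∧ pvCell matriz (i - 1) j = "|" then suma + 1 else suma
        let suma := if i < filas - 1 ∧ pvCell matriz (i + 1) j = "|" then suma + 1 else suma
        let suma := if 0 < i ∧ pvCell matriz (i - 1) j = "H" then suma + 2 else suma
        let suma := if i < filas - 1 ∧ pvCell matriz (i + 1) j = "H" then suma + 2 else suma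
        let suma := if 0 < j ∧ pvCell matriz i (j - 1) = "-" then suma + 1 else suma
        let suma := if j < columnas - 1 ∧ pvCell matriz i (j + 1) = "-" then suma + 1 else suma
        let suma := if 0 < j ∧ pvCell matriz i (j - 1) = "=" then suma + 2 else suma
        let suma := if j < columnas - 1 ∧ pvCell matriz i (j + 1) = "=" then suma + 2 else suma
        solucion ++ [((PySem.Int.ofStr? (pvCell matriz i j)).getD 0, suma)]
      else solucion) solucion) []

-- ===== PORT B =====
-- the body of B's scatter loop at cell (i, j): the bridge cell pushes its weight onto
-- the adjacent island cells (keys are the (row, col) pairs; guards make toNat exact)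
def pvScatterCell (matriz : List (List String)) (filas columnas : Nat)
    (carga : PySem.Dict (Nat × Nat) Int) (i j : Nat) : PySem.Dict (Nat × Nat) Int :=
  let c := pvCell matriz i j
  if c = "|" ∨ c = "H" then
    let w : Int := if c = "|" then 1 else 2
    [(i : Int) - 1, (i : Int) + 1].foldl (fun carga ni =>
      if 0 ≤ ni ∧ ni < (filas : Int) ∧ pvCell matriz ni.toNat j ∈ pvNumeros then
        PySem.Dict.insert carga (ni.toNat, j) (PySem.Dict.getD carga (ni.toNat, j) 0 + w)
      else carga) carga
  else if c = "-" ∨ c = "=" then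
    let w : Int := if c = "-" then 1 else 2
    [(j : Int) - 1, (j : Int) + 1].foldl (fun carga nj =>
      if 0 ≤ nj ∧ nj < (columnas : Int) ∧ pvCell matriz i nj.toNat ∈ pvNumeros then
        PySem.Dict.insert carga (i, nj.toNat) (PySem.Dict.getD carga (i, nj.toNat) 0 + w)
      else carga) carga
  else carga

def validar_conexiones_necesarias_alt (matriz : List (List String)) : List (Int × Int) :=
  let filas := matriz.length
  let columnas := (matriz.headD []).length
  let carga : PySem.Dict (Nat × Nat) Int :=
    (List.range filas).foldl (fun carga i =>
      (List.range columnas).foldl (fun carga j =>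
        pvScatterCell matriz filas columnas carga i j) carga) PySem.Dict.empty
  (List.range filas).foldl (fun sol i =>
    (List.range columnas).foldl (fun sol j =>
      if pvCell matriz i j ∈ pvNumeros then
        sol ++ [((PySem.Int.ofStr? (pvCell matriz i j)).getD 0, PySem.Dict.getD carga (i, j) 0)]
      else sol) sol) []

-- ===== PRECONDITION & SPEC =====
-- Pre_ excludes exactly the inputs on which the Python A raises IndexError: the empty
-- matrix (len(matriz[0])) and ragged matrices with a row shorter than row 0.
def Pre_validar_conexiones_necesarias (matriz : List (List String)) : Prop :=
  matriz ≠ [] ∧ ∀ row ∈ matriz, (matriz.headD []).length ≤ row.length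
instance (matriz : List (List String)) : Decidable (Pre_validar_conexiones_necesarias matriz) := by
  unfold Pre_validar_conexiones_necesarias; infer_instance
def pvWitness_validar_conexiones_necesarias : List (List String) :=
  [["2", "-", "1"], ["|", " ", " "], ["1", " ", " "]]
def Spec_validar_conexiones_necesarias (matriz : List (List String)) (out : List (Int × Int)) : Prop := out = validar_conexiones_necesarias_alt matriz
instance (matriz : List (List String)) (out : List (Int × Int)) : Decidable (Spec_validar_conexiones_necesarias matriz out) := by unfold Spec_validar_conexiones_necesarias; infer_instance

-- ===== CLAIM (what is proved, stated in full; the proofs are below) =====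
def Claim_equal_validar_conexiones_necesarias : Prop := ∀ (matriz : List (List String)), Dom_validar_conexiones_necesarias matriz → Pre_validar_conexiones_necesarias matriz → Spec_validar_conexiones_necesarias matriz (validar_conexiones_necesarias matriz)

-- ===== LEMMAS AND PROOFS =====

-- vertical / horizontal bridge weight of a character
def pvVW (c : String) : Int := if c = "|" then 1 else if c = "H" then 2 else 0
def pvHW (c : String) : Int := if c = "-" then 1 else if c = "=" then 2 else 0

-- amount the scatter step at cell (i, j) adds to the load of key (a, b)
def pvContrib (m : List (List String)) (filas columnas i j a b : Nat) : Int :=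
  pvVW (pvCell m i j) *
      ((if 1 ≤ i ∧ i - 1 < filas ∧ pvCell m (i - 1) j ∈ pvNumeros ∧ a = i - 1 ∧ b = j then 1 else 0)
        + (if i + 1 < filas ∧ pvCell m (i + 1) j ∈ pvNumeros ∧ a = i + 1 ∧ b = j then 1 else 0))
    + pvHW (pvCell m i j) *
      ((if 1 ≤ j ∧ j - 1 < columnas ∧ pvCell m i (j - 1) ∈ pvNumeros ∧ a = i ∧ b = j - 1 then 1 else 0)
        + (if j + 1 < columnas ∧ pvCell m i (j + 1) ∈ pvNumeros ∧ a = i ∧ b = j + 1 then 1 else 0))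

-- effect of two guarded 'carga[k] = carga.get(k,0)+w' pushes on one lookup
lemma pv_push2 {T1 T2 : Prop} [Decidable T1] [Decidable T2]
    (d : PySem.Dict (Nat × Nat) Int) (k1 k2 k : Nat × Nat) (w : Int)
    (hk : T1 → T2 → k1 ≠ k2) :
    PySem.Dict.getD
      (if T2 then
        PySem.Dict.insert (if T1 then PySem.Dict.insert d k1 (PySem.Dict.getD d k1 0 + w) else d) k2
          (PySem.Dict.getD (if T1 then PySem.Dict.insert d k1 (PySem.Dict.getD d k1 0 + w) else d) k2 0 + w)
      else if T1 then PySem.Dict.insert d k1 (PySem.Dict.getD d k1 0 + w) else d) k 0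
      = PySem.Dict.getD d k 0
        + ((if T1 ∧ k = k1 then w else 0) + (if T2 ∧ k = k2 then w else 0)) := by
  by_cases hT1 : T1 <;> by_cases hT2 : T2 <;>
    simp only [hT1, hT2, true_and, false_and, ite_true, ite_false]
  · have hne : ¬ (k2 = k1) := fun h => hk hT1 hT2 h.symm
    simp only [PySem.Dict.getD_insert, if_neg hne]
    by_cases e2 : k = k2 <;> by_cases e1 : k = k1 <;>
      simp only [e1, e2, ite_true, ite_false] <;> simp_all
  · simp only [PySem.Dict.getD_insert]
    by_cases e1 : k = k1 <;> simp [e1]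
  · simp only [PySem.Dict.getD_insert]
    by_cases e2 : k = k2 <;> simp [e2]
  · simp

lemma pv_step_getD (m : List (List String)) (filas columnas : Nat)
    (d : PySem.Dict (Nat × Nat) Int) (i j a b : Nat) :
    PySem.Dict.getD (pvScatterCell m filas columnas d i j) (a, b) 0
      = PySem.Dict.getD d (a, b) 0 + pvContrib m filas columnas i j a b := by
  simp only [pvScatterCell]
  by_cases hv : pvCell m i j = "|" ∨ pvCell m i j = "H"
  · rw [if_pos hv]
    simp only [List.foldl_cons, List.foldl_nil]
    rw [pv_push2 _ _ _ _ _ (by rintro ⟨g1, -, -⟩ -; simp only [ne_eq, Prod.mk.injEq]; omega)]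
    have hA : ((0 ≤ (i:Int) - 1 ∧ (i:Int) - 1 < (filas:Int) ∧
          pvCell m ((i:Int) - 1).toNat j ∈ pvNumeros) ∧
          ((a, b) : Nat × Nat) = (((i:Int) - 1).toNat, j)) ↔
        (1 ≤ i ∧ i - 1 < filas ∧ pvCell m (i - 1) j ∈ pvNumeros ∧ a = i - 1 ∧ b = j) := by
      by_cases hi : 1 ≤ i
      · have e : ((i:Int) - 1).toNat = i - 1 := by omega
        rw [e]; simp only [Prod.mk.injEq]
        constructor
        · rintro ⟨⟨g1, g2, g3⟩, g4, g5⟩; exact ⟨hi, by omega, g3, g4, g5⟩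
        · rintro ⟨g1, g2, g3, g4, g5⟩; exact ⟨⟨by omega, by omega, g3⟩, g4, g5⟩
      · constructor
        · rintro ⟨⟨g1, -⟩, -⟩; omega
        · rintro ⟨g1, -⟩; omega
    have hB : ((0 ≤ (i:Int) + 1 ∧ (i:Int) + 1 < (filas:Int) ∧
          pvCell m ((i:Int) + 1).toNat j ∈ pvNumeros) ∧
          ((a, b) : Nat × Nat) = (((i:Int) + 1).toNat, j)) ↔
        (i + 1 < filas ∧ pvCell m (i + 1) j ∈ pvNumeros ∧ a = i + 1 ∧ b = j) := by
      have e : ((i:Int) + 1).toNat = i + 1 := by omega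
      rw [e]; simp only [Prod.mk.injEq]
      constructor
      · rintro ⟨⟨g1, g2, g3⟩, g4, g5⟩; exact ⟨by omega, g3, g4, g5⟩
      · rintro ⟨g1, g2, g3, g4⟩; exact ⟨⟨by omega, by omega, g2⟩, g3, g4⟩
    rw [if_congr hA rfl rfl, if_congr hB rfl rfl]
    simp only [pvContrib, pvVW, pvHW]
    rcases hv with hv | hv <;> (rw [hv]; simp; try (split_ifs <;> ring))
  · rw [if_neg hv]
    by_cases hh : pvCell m i j = "-" ∨ pvCell m i j = "="
    · rw [if_pos hh]
      simp only [List.foldl_cons, List.foldl_nil]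
      rw [pv_push2 _ _ _ _ _ (by rintro ⟨g1, -, -⟩ -; simp only [ne_eq, Prod.mk.injEq]; omega)]
      have hA : ((0 ≤ (j:Int) - 1 ∧ (j:Int) - 1 < (columnas:Int) ∧
            pvCell m i ((j:Int) - 1).toNat ∈ pvNumeros) ∧
            ((a, b) : Nat × Nat) = (i, ((j:Int) - 1).toNat)) ↔
          (1 ≤ j ∧ j - 1 < columnas ∧ pvCell m i (j - 1) ∈ pvNumeros ∧ a = i ∧ b = j - 1) := by
        by_cases hj : 1 ≤ j
        · have e : ((j:Int) - 1).toNat = j - 1 := by omega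
          rw [e]; simp only [Prod.mk.injEq]
          constructor
          · rintro ⟨⟨g1, g2, g3⟩, g4, g5⟩; exact ⟨hj, by omega, g3, g4, g5⟩
          · rintro ⟨g1, g2, g3, g4, g5⟩; exact ⟨⟨by omega, by omega, g3⟩, g4, g5⟩
        · constructor
          · rintro ⟨⟨g1, -⟩, -⟩; omega
          · rintro ⟨g1, -⟩; omega
      have hB : ((0 ≤ (j:Int) + 1 ∧ (j:Int) + 1 < (columnas:Int) ∧
            pvCell m i ((j:Int) + 1).toNat ∈ pvNumeros) ∧
            ((a, b) : Nat × Nat) = (i, ((j:Int) + 1).toNat)) ↔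
          (j + 1 < columnas ∧ pvCell m i (j + 1) ∈ pvNumeros ∧ a = i ∧ b = j + 1) := by
        have e : ((j:Int) + 1).toNat = j + 1 := by omega
        rw [e]; simp only [Prod.mk.injEq]
        constructor
        · rintro ⟨⟨g1, g2, g3⟩, g4, g5⟩; exact ⟨by omega, g3, g4, g5⟩
        · rintro ⟨g1, g2, g3, g4⟩; exact ⟨⟨by omega, by omega, g2⟩, g3, g4⟩
      rw [if_congr hA rfl rfl, if_congr hB rfl rfl]
      simp only [pvContrib, pvVW, pvHW]
      rcases hh with hh | hh <;> (rw [hh]; simp; try (split_ifs <;> ring))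
    · rw [if_neg hh]
      rw [not_or] at hv hh
      simp [pvContrib, pvVW, pvHW, hv.1, hv.2, hh.1, hh.2]

lemma pv_foldl_getD {α : Type} (L : List α)
    (step : PySem.Dict (Nat × Nat) Int → α → PySem.Dict (Nat × Nat) Int)
    (g : α → Int)
    (k : Nat × Nat)
    (h : ∀ d x, PySem.Dict.getD (step d x) k 0 = PySem.Dict.getD d k 0 + g x) :
    ∀ d, PySem.Dict.getD (L.foldl step d) k 0
      = PySem.Dict.getD d k 0 + (L.map g).sum := by
  induction L with
  | nil => simp
  | cons x xs ih => intro d; simp only [List.foldl_cons, List.map_cons, List.sum_cons, ih, h]; ring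

lemma pv_sum_spike (n t : Nat) (v : Int) (g : Nat → Int)
    (h : ∀ x, g x = if x = t then v else 0) :
    ((List.range n).map g).sum = if t < n then v else 0 := by
  induction n with
  | zero => simp
  | succ n ih =>
    rw [List.range_succ, List.map_append, List.sum_append, ih]
    simp only [List.map_cons, List.map_nil, List.sum_cons, List.sum_nil, h n]
    by_cases h1 : t < n <;> by_cases h2 : n = t <;> simp [h1, h2] <;> omega

lemma pv_sum2_spike (n1 n2 t1 t2 : Nat) (C : Prop) [Decidable C] (v : Int)
    (g : Nat → Nat → Int)
    (h : ∀ x y, g x y = if C ∧ x = t1 ∧ y = t2 then v else 0) :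
    ((List.range n1).map (fun x => ((List.range n2).map (g x)).sum)).sum
      = if C ∧ t1 < n1 ∧ t2 < n2 then v else 0 := by
  by_cases hC : C
  · have hin : ∀ x, ((List.range n2).map (g x)).sum
        = if x = t1 then (if t2 < n2 then v else 0) else 0 := by
      intro x
      by_cases hx : x = t1
      · subst hx
        rw [pv_sum_spike n2 t2 v (g x) (fun y => by rw [h]; simp [hC])]
        simp
      · have hz : ∀ y, g x y = 0 := fun y => by rw [h]; simp [hx]
        rw [List.sum_eq_zero (by simp [hz])]
        simp [hx]
    rw [pv_sum_spike n1 t1 (if t2 < n2 then v else 0) _ hin]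
    by_cases h1 : t1 < n1 <;> by_cases h2 : t2 < n2 <;> simp [hC, h1, h2]
  · have hz : ∀ x y, g x y = 0 := fun x y => by rw [h]; simp [hC]
    rw [List.sum_eq_zero, if_neg (by tauto)]
    simp only [List.mem_map, List.mem_range]
    rintro s ⟨x, -, rfl⟩
    exact List.sum_eq_zero (by simp [hz])

lemma pv_total (m : List (List String)) (a b : Nat)
    (ha : a < m.length) (hb : b < (m.headD []).length)
    (hisl : pvCell m a b ∈ pvNumeros) :
    ((List.range m.length).map (fun i =>
        ((List.range (m.headD []).length).map (fun j =>
            pvContrib m m.length (m.headD []).length i j a b)).sum)).sum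
      = (if a + 1 < m.length then pvVW (pvCell m (a + 1) b) else 0)
        + (if 1 ≤ a then pvVW (pvCell m (a - 1) b) else 0)
        + (if b + 1 < (m.headD []).length then pvHW (pvCell m a (b + 1)) else 0)
        + (if 1 ≤ b then pvHW (pvCell m a (b - 1)) else 0) := by
  have hmain : ∀ x y, pvContrib m m.length (m.headD []).length x y a b
      = (if True ∧ x = a + 1 ∧ y = b then pvVW (pvCell m (a + 1) b) else 0)
        + (if 1 ≤ a ∧ x = a - 1 ∧ y = b then pvVW (pvCell m (a - 1) b) else 0)
        + (if True ∧ x = a ∧ y = b + 1 then pvHW (pvCell m a (b + 1)) else 0)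
        + (if 1 ≤ b ∧ x = a ∧ y = b - 1 then pvHW (pvCell m a (b - 1)) else 0) := by
    intro x y
    have h1 : pvVW (pvCell m x y)
        * (if 1 ≤ x ∧ x - 1 < m.length ∧ pvCell m (x - 1) y ∈ pvNumeros ∧ a = x - 1 ∧ b = y then (1:Int) else 0)
        = (if True ∧ x = a + 1 ∧ y = b then pvVW (pvCell m (a + 1) b) else 0) := by
      by_cases hx : x = a + 1 ∧ y = b
      · have hx1 := hx.1; have hx2 := hx.2
        have hc : 1 ≤ x ∧ x - 1 < m.length ∧ pvCell m (x - 1) y ∈ pvNumeros ∧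
            a = x - 1 ∧ b = y :=
          ⟨by omega, by omega, by rw [show x - 1 = a from by omega, hx2]; exact hisl,
            by omega, hx2.symm⟩
        rw [if_pos hc, if_pos ⟨trivial, hx1, hx2⟩, mul_one, hx1, hx2]
      · rw [if_neg (by rintro ⟨h1, h2, h3, h4, h5⟩; exact hx ⟨by omega, h5.symm⟩),
          if_neg (fun h => hx h.2), mul_zero]
    have h2 : pvVW (pvCell m x y)
        * (if x + 1 < m.length ∧ pvCell m (x + 1) y ∈ pvNumeros ∧ a = x + 1 ∧ b = y then (1:Int) else 0)
        = (if 1 ≤ a ∧ x = a - 1 ∧ y = b then pvVW (pvCell m (a - 1) b) else 0) := by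
      by_cases hx : 1 ≤ a ∧ x = a - 1 ∧ y = b
      · have ha1 := hx.1; have hx1 := hx.2.1; have hx2 := hx.2.2
        have hc : x + 1 < m.length ∧ pvCell m (x + 1) y ∈ pvNumeros ∧
            a = x + 1 ∧ b = y :=
          ⟨by omega, by rw [show x + 1 = a from by omega, hx2]; exact hisl,
            by omega, hx2.symm⟩
        rw [if_pos hc, if_pos ⟨ha1, hx1, hx2⟩, mul_one, hx1, hx2]
      · rw [if_neg (by rintro ⟨h1, h2, h3, h4⟩; exact hx ⟨by omega, by omega, h4.symm⟩),
          if_neg hx, mul_zero]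
    have h3 : pvHW (pvCell m x y)
        * (if 1 ≤ y ∧ y - 1 < (m.headD []).length ∧ pvCell m x (y - 1) ∈ pvNumeros ∧ a = x ∧ b = y - 1 then (1:Int) else 0)
        = (if True ∧ x = a ∧ y = b + 1 then pvHW (pvCell m a (b + 1)) else 0) := by
      by_cases hx : x = a ∧ y = b + 1
      · have hx1 := hx.1; have hx2 := hx.2
        have hc : 1 ≤ y ∧ y - 1 < (m.headD []).length ∧
            pvCell m x (y - 1) ∈ pvNumeros ∧ a = x ∧ b = y - 1 :=
          ⟨by omega, by omega, by rw [hx1, show y - 1 = b from by omega]; exact hisl,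
            hx1.symm, by omega⟩
        rw [if_pos hc, if_pos ⟨trivial, hx1, hx2⟩, mul_one, hx1, hx2]
      · rw [if_neg (by rintro ⟨h1, h2, h3, h4, h5⟩; exact hx ⟨h4.symm, by omega⟩),
          if_neg (fun h => hx h.2), mul_zero]
    have h4 : pvHW (pvCell m x y)
        * (if y + 1 < (m.headD []).length ∧ pvCell m x (y + 1) ∈ pvNumeros ∧ a = x ∧ b = y + 1 then (1:Int) else 0)
        = (if 1 ≤ b ∧ x = a ∧ y = b - 1 then pvHW (pvCell m a (b - 1)) else 0) := by
      by_cases hx : 1 ≤ b ∧ x = a ∧ y = b - 1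
      · have hb1 := hx.1; have hx1 := hx.2.1; have hx2 := hx.2.2
        have hc : y + 1 < (m.headD []).length ∧ pvCell m x (y + 1) ∈ pvNumeros ∧
            a = x ∧ b = y + 1 :=
          ⟨by omega, by rw [hx1, show y + 1 = b from by omega]; exact hisl,
            hx1.symm, by omega⟩
        rw [if_pos hc, if_pos ⟨hb1, hx1, hx2⟩, mul_one, hx1, hx2]
      · rw [if_neg (by rintro ⟨h1, h2, h3, h4⟩; exact hx ⟨by omega, h3.symm, by omega⟩),
          if_neg hx, mul_zero]
    calc pvContrib m m.length (m.headD []).length x y a b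
        = pvVW (pvCell m x y) * (if 1 ≤ x ∧ x - 1 < m.length ∧ pvCell m (x - 1) y ∈ pvNumeros ∧ a = x - 1 ∧ b = y then (1:Int) else 0)
          + pvVW (pvCell m x y) * (if x + 1 < m.length ∧ pvCell m (x + 1) y ∈ pvNumeros ∧ a = x + 1 ∧ b = y then (1:Int) else 0)
          + pvHW (pvCell m x y) * (if 1 ≤ y ∧ y - 1 < (m.headD []).length ∧ pvCell m x (y - 1) ∈ pvNumeros ∧ a = x ∧ b = y - 1 then (1:Int) else 0)
          + pvHW (pvCell m x y) * (if y + 1 < (m.headD []).length ∧ pvCell m x (y + 1) ∈ pvNumeros ∧ a = x ∧ b = y + 1 then (1:Int) else 0) := by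
          unfold pvContrib; ring
      _ = _ := by rw [h1, h2, h3, h4]
  simp only [hmain]
  simp only [PySem.List.sum_map_add_int]
  have e1 := pv_sum2_spike m.length (m.headD []).length (a + 1) b True (pvVW (pvCell m (a + 1) b))
    (fun x y => if True ∧ x = a + 1 ∧ y = b then pvVW (pvCell m (a + 1) b) else 0) (fun _ _ => rfl)
  have e2 := pv_sum2_spike m.length (m.headD []).length (a - 1) b (1 ≤ a) (pvVW (pvCell m (a - 1) b))
    (fun x y => if 1 ≤ a ∧ x = a - 1 ∧ y = b then pvVW (pvCell m (a - 1) b) else 0) (fun _ _ => rfl)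
  have e3 := pv_sum2_spike m.length (m.headD []).length a (b + 1) True (pvHW (pvCell m a (b + 1)))
    (fun x y => if True ∧ x = a ∧ y = b + 1 then pvHW (pvCell m a (b + 1)) else 0) (fun _ _ => rfl)
  have e4 := pv_sum2_spike m.length (m.headD []).length a (b - 1) (1 ≤ b) (pvHW (pvCell m a (b - 1)))
    (fun x y => if 1 ≤ b ∧ x = a ∧ y = b - 1 then pvHW (pvCell m a (b - 1)) else 0) (fun _ _ => rfl)
  simp only [e1, e2, e3, e4]
  have c1 : (True ∧ a + 1 < m.length ∧ b < (m.headD []).length) ↔ (a + 1 < m.length) := by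
    constructor
    · rintro ⟨-, h, -⟩; exact h
    · intro h; exact ⟨trivial, h, hb⟩
  have c2 : (1 ≤ a ∧ a - 1 < m.length ∧ b < (m.headD []).length) ↔ (1 ≤ a) := by
    constructor
    · rintro ⟨h, -, -⟩; exact h
    · intro h; exact ⟨h, by omega, hb⟩
  have c3 : (True ∧ a < m.length ∧ b + 1 < (m.headD []).length) ↔ (b + 1 < (m.headD []).length) := by
    constructor
    · rintro ⟨-, -, h⟩; exact h
    · intro h; exact ⟨trivial, ha, h⟩
  have c4 : (1 ≤ b ∧ a < m.length ∧ b - 1 < (m.headD []).length) ↔ (1 ≤ b) := by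
    constructor
    · rintro ⟨h, -, -⟩; exact h
    · intro h; exact ⟨h, ha, by omega⟩
  rw [if_congr c1 rfl rfl, if_congr c2 rfl rfl, if_congr c3 rfl rfl, if_congr c4 rfl rfl]

lemma pv_ite_add {P : Prop} [Decidable P] (s w : Int) :
    (if P then s + w else s) = s + (if P then w else 0) := by split <;> simp

lemma pv_ite_w {P A B : Prop} [Decidable P] [Decidable A] [Decidable B] (hAB : ¬(A ∧ B)) :
    (if P then (if A then (1:Int) else if B then 2 else 0) else 0)
      = (if P ∧ A then 1 else 0) + (if P ∧ B then 2 else 0) := by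
  by_cases hP : P <;> by_cases hA : A <;> by_cases hB : B <;> simp_all

lemma pv_gather_eq (m : List (List String)) (a b : Nat)
    (ha : a < m.length) (hb : b < (m.headD []).length) :
    (if a + 1 < m.length then pvVW (pvCell m (a + 1) b) else 0)
      + (if 1 ≤ a then pvVW (pvCell m (a - 1) b) else 0)
      + (if b + 1 < (m.headD []).length then pvHW (pvCell m a (b + 1)) else 0)
      + (if 1 ≤ b then pvHW (pvCell m a (b - 1)) else 0)
    = (let suma : Int := 0
       let suma := if 0 < a ∧ pvCell m (a - 1) b = "|" then suma + 1 else suma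
       let suma := if a < m.length - 1 ∧ pvCell m (a + 1) b = "|" then suma + 1 else suma
       let suma := if 0 < a ∧ pvCell m (a - 1) b = "H" then suma + 2 else suma
       let suma := if a < m.length - 1 ∧ pvCell m (a + 1) b = "H" then suma + 2 else suma
       let suma := if 0 < b ∧ pvCell m a (b - 1) = "-" then suma + 1 else suma
       let suma := if b < (m.headD []).length - 1 ∧ pvCell m a (b + 1) = "-" then suma + 1 else suma
       let suma := if 0 < b ∧ pvCell m a (b - 1) = "=" then suma + 2 else suma
       let suma := if b < (m.headD []).length - 1 ∧ pvCell m a (b + 1) = "=" then suma + 2 else suma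
       suma) := by
  simp only [pvVW, pvHW, pv_ite_add]
  rw [pv_ite_w (by rintro ⟨h1, h2⟩; rw [h1] at h2; exact absurd h2 (by decide)),
    pv_ite_w (by rintro ⟨h1, h2⟩; rw [h1] at h2; exact absurd h2 (by decide)),
    pv_ite_w (by rintro ⟨h1, h2⟩; rw [h1] at h2; exact absurd h2 (by decide)),
    pv_ite_w (by rintro ⟨h1, h2⟩; rw [h1] at h2; exact absurd h2 (by decide))]
  simp only [show (a + 1 < m.length) ↔ (a < m.length - 1) from by omega,
    show (1 ≤ a) ↔ (0 < a) from by omega,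
    show (b + 1 < (m.headD []).length) ↔ (b < (m.headD []).length - 1) from by omega,
    show (1 ≤ b) ↔ (0 < b) from by omega]
  ring

-- ===== VERDICT (by name: the statement is the Claim_ definition above) =====
theorem validar_conexiones_necesarias_spec : Claim_equal_validar_conexiones_necesarias := by
  intro matriz _ _
  unfold Spec_validar_conexiones_necesarias
  unfold validar_conexiones_necesarias validar_conexiones_necesarias_alt
  refine PySem.List.foldl_congr_mem _ _ _ _ (fun sol i hi => ?_)
  refine PySem.List.foldl_congr_mem _ _ _ _ (fun sol j hj => ?_)
  rw [List.mem_range] at hi hj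
  by_cases h : pvCell matriz i j ∈ pvNumeros
  · simp only [h, if_pos]
    have hload : PySem.Dict.getD
        ((List.range matriz.length).foldl (fun carga i =>
          (List.range (matriz.headD []).length).foldl (fun carga j =>
            pvScatterCell matriz matriz.length (matriz.headD []).length carga i j) carga)
          PySem.Dict.empty) (i, j) 0
        = (if i + 1 < matriz.length then pvVW (pvCell matriz (i + 1) j) else 0)
          + (if 1 ≤ i then pvVW (pvCell matriz (i - 1) j) else 0)
          + (if j + 1 < (matriz.headD []).length then pvHW (pvCell matriz i (j + 1)) else 0)
          + (if 1 ≤ j then pvHW (pvCell matriz i (j - 1)) else 0) := by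
      rw [pv_foldl_getD _ _ (fun x => ((List.range (matriz.headD []).length).map
            (fun y => pvContrib matriz matriz.length (matriz.headD []).length x y i j)).sum)
          (i, j)
          (fun d x => pv_foldl_getD _ _
            (fun y => pvContrib matriz matriz.length (matriz.headD []).length x y i j) (i, j)
            (fun d' y => pv_step_getD matriz matriz.length (matriz.headD []).length d' x y i j) d)]
      rw [pv_total matriz i j hi hj h]
      simp
    rw [hload, pv_gather_eq matriz i j hi hj]
  · simp only [h, if_neg, not_false_iff]
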